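-- pv_equiv track=rewrite | github.com/gaurizade/resumeUpload | PthonResume/conf.py | find_related_text
-- ===== SOURCE A (Python) =====
-- def find_related_text(resume_text, keywords):
--     """
--     This function finds keywords in the resume text and extracts related text to those keywords.
--     Returns a dictionary output.
--     """
--     parsed_content = {}
--     for keyword in keywords:
--         try:
--             idx = resume_text.index(keyword)
--             next_idx = len(resume_text)
--             for kw in keywords:
--                 if kw != keyword:
--                     try:
--                         kw_idx = resume_text.index(kw)
--                         if idx < kw_idx < next_idx:
--                             next_idx = kw_idx
--                     except:
--                         pass
--             parsed_content[keyword] = resume_text[idx+len(keyword):next_idx].strip()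
--         except:
--             pass
--     return parsed_content
-- ===== SOURCE B (Python) =====
-- def _next_greater(sorted_idxs, x):
--     """Index of the first element strictly greater than x in an ascending list."""
--     lo, hi = 0, len(sorted_idxs)
--     while lo < hi:
--         mid = (lo + hi) // 2
--         if sorted_idxs[mid] <= x:
--             lo = mid + 1
--         else:
--             hi = mid
--     return lo
--
--
-- def find_related_text(resume_text, keywords):
--     """
--     This function finds keywords in the resume text and extracts related text to those keywords.
--     Returns a dictionary output.
--     """
--     n = len(resume_text)
--     first = {}
--     for kw in keywords:
--         if kw not in first:
--             i = resume_text.find(kw)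
--             if i != -1:
--                 first[kw] = i
--     idxs = sorted(set(first.values()))
--     parsed_content = {}
--     for kw, idx in first.items():
--         j = _next_greater(idxs, idx)
--         nxt = idxs[j] if j < len(idxs) else n
--         parsed_content[kw] = resume_text[idx + len(kw):nxt].strip()
--     return parsed_content
-- ===== Notes on version B (the rewrite author's own statement) =====
-- stated objective: faster
-- what changed: A re-runs resume_text.index for every pair of keywords (a quadratic number of full-text scans); B computes each distinct keyword's first occurrence once, sorts the distinct indices, and finds each keyword's next greater index by binary search.
import Mathlib
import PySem

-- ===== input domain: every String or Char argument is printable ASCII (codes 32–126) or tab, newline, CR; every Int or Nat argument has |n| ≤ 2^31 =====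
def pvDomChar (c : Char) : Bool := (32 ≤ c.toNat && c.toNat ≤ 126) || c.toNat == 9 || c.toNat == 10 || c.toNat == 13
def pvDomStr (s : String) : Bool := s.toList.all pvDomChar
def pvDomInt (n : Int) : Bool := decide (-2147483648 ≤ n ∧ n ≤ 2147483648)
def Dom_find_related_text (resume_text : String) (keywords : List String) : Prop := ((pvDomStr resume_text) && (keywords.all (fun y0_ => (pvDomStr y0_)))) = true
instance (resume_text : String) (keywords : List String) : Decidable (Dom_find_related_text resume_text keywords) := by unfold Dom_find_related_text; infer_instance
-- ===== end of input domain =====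

-- B replaces A's nested rescans (resume_text.index re-run for every pair of keywords) by one
-- find per distinct keyword plus a binary search in the sorted index list; objective: faster.

-- ===== PORT A =====
-- inner loop of A: scan all keywords for the smallest first-occurrence index strictly between idx and next_idx
def find_related_text_next (resume_text : String) (keywords : List String) (keyword : String) (idx : Int) : Int :=
  keywords.foldl (fun next_idx kw =>
    if kw ≠ keyword then
      let kw_idx := PySem.Str.find resume_text kw
      if kw_idx < 0 then next_idx   -- resume_text.index(kw) raised ValueError: except: pass
      else if idx < kw_idx ∧ kw_idx < next_idx then kw_idx else next_idx
    else next_idx) (PySem.Str.len resume_text)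

-- body of A's outer loop
def find_related_text_step (resume_text : String) (keywords : List String)
    (parsed_content : PySem.Dict String String) (keyword : String) : PySem.Dict String String :=
  let idx := PySem.Str.find resume_text keyword
  if idx < 0 then parsed_content   -- resume_text.index(keyword) raised ValueError: except: pass
  else
    let next_idx := find_related_text_next resume_text keywords keyword idx
    parsed_content.insert keyword
      (PySem.Str.strip (PySem.Str.slice resume_text (some (idx + PySem.Str.len keyword)) (some next_idx)))

def find_related_text (resume_text : String) (keywords : List String) : List (String × String) :=
  (keywords.foldl (find_related_text_step resume_text keywords) PySem.Dict.empty).items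

-- ===== PORT B =====
-- B's hand-written bisection loop: index of the first element of sorted_idxs strictly greater than x
def nextGreaterGo (sorted_idxs : List Int) (x : Int) (lo hi : Nat) : Nat :=
  if _h : lo < hi then
    let mid := (lo + hi) / 2
    if sorted_idxs.getD mid 0 ≤ x then nextGreaterGo sorted_idxs x (mid + 1) hi
    else nextGreaterGo sorted_idxs x lo mid
  else lo
termination_by hi - lo
decreasing_by all_goals omega

-- B's first pass: first-occurrence index of each distinct found keyword, one find per keyword
def find_related_text_alt_first (resume_text : String) (keywords : List String) : PySem.Dict String Int :=
  keywords.foldl (fun first kw =>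
    if first.contains kw then first
    else
      let i := PySem.Str.find resume_text kw
      if i ≠ -1 then first.insert kw i else first) PySem.Dict.empty

-- body of B's output loop
def find_related_text_alt_val (resume_text : String) (idxs : List Int) (n : Int) (kw : String) (idx : Int) : String :=
  let j := nextGreaterGo idxs idx 0 idxs.length
  let nxt := if j < idxs.length then idxs.getD j 0 else n
  PySem.Str.strip (PySem.Str.slice resume_text (some (idx + PySem.Str.len kw)) (some nxt))

def find_related_text_alt (resume_text : String) (keywords : List String) : List (String × String) :=
  let n := PySem.Str.len resume_text
  let first := find_related_text_alt_first resume_text keywords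
  let idxs : List Int := PySem.List.sorted (PySem.Set.ofList first.values) (fun x => x)
  (first.items.foldl (fun parsed_content p =>
      parsed_content.insert p.1 (find_related_text_alt_val resume_text idxs n p.1 p.2))
    PySem.Dict.empty).items

-- ===== PRECONDITION & SPEC =====
def Spec_find_related_text (resume_text : String) (keywords : List String) (out : List (String × String)) : Prop := out = find_related_text_alt resume_text keywords
instance (resume_text : String) (keywords : List String) (out : List (String × String)) : Decidable (Spec_find_related_text resume_text keywords out) := by unfold Spec_find_related_text; infer_instance

-- ===== CLAIM (what is proved, stated in full; the proofs are below) =====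
def Claim_equal_find_related_text : Prop := ∀ (resume_text : String) (keywords : List String), Dom_find_related_text resume_text keywords → Spec_find_related_text resume_text keywords (find_related_text resume_text keywords)

-- ===== LEMMAS AND PROOFS =====

-- the value A stores for a found keyword (independent of the dict state)
def pvValA (s : String) (kws : List String) (k : String) : String :=
  PySem.Str.strip (PySem.Str.slice s (some (PySem.Str.find s k + PySem.Str.len k))
    (some (find_related_text_next s kws k (PySem.Str.find s k))))

-- the distinct found keywords, in first-occurrence order
def pvK (s : String) (kws : List String) : List String :=
  PySem.Set.ofList (kws.filter (fun kw => decide (0 ≤ PySem.Str.find s kw)))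

-- A's inner loop body, named for the invariant proof (definitionally the fold body of find_related_text_next)
def pvStep (s kw : String) (idx : Int) (next_idx : Int) (kw' : String) : Int :=
  if kw' ≠ kw then
    if PySem.Str.find s kw' < 0 then next_idx
    else if idx < PySem.Str.find s kw' ∧ PySem.Str.find s kw' < next_idx then PySem.Str.find s kw' else next_idx
  else next_idx

lemma pv_next_eq (s : String) (kws : List String) (kw : String) (idx : Int) :
    find_related_text_next s kws kw idx = kws.foldl (pvStep s kw idx) (PySem.Str.len s) := rfl

lemma pv_neg_one_le_find (s kw : String) : -1 ≤ PySem.Str.find s kw := by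
  simpa [PySem.Str.find] using PySem.Chars.neg_one_le_find s.toList kw.toList

lemma pv_find_le_len (s kw : String) : PySem.Str.find s kw ≤ PySem.Str.len s := by
  simpa [PySem.Str.find, PySem.Str.len_eq] using PySem.Chars.find_le_length s.toList kw.toList

lemma pv_contains_of_items {ν : Type} (d : PySem.Dict String ν) (M : List String) (f : String → ν)
    (h : d.items = M.map (fun k => (k, f k))) (kw : String) :
    d.contains kw = decide (kw ∈ M) := by
  simp only [PySem.Dict.contains, h, List.any_map]
  rcases Bool.eq_false_or_eq_true (M.any ((fun p => p.1 == kw) ∘ fun k => (k, f k))) with hb | hb <;>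
    rw [hb]
  · symm; rw [decide_eq_true_eq]
    rw [List.any_eq_true] at hb
    obtain ⟨k, hk, hkk⟩ := hb
    simpa using (by simpa using hkk : k = kw) ▸ hk
  · symm; rw [decide_eq_false_iff_not]
    intro hmem
    rw [List.any_eq_false] at hb
    exact absurd (by simp : ((fun p => p.1 == kw) ∘ fun k => (k, f k)) kw = true) (by simpa using hb kw hmem)

lemma pv_set_add_mem (M : List String) (kw : String) (h : kw ∈ M) : PySem.Set.add M kw = M := by
  simp [PySem.Set.add, PySem.Set.contains, h]

lemma pv_set_add_not_mem (M : List String) (kw : String) (h : ¬ kw ∈ M) : PySem.Set.add M kw = M ++ [kw] := by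
  simp [PySem.Set.add, PySem.Set.contains, h]

-- inserting a state-independent value: overwriting an existing key is a no-op, a new key appends
lemma pv_insert_items {ν : Type} (d : PySem.Dict String ν) (M : List String) (f : String → ν)
    (h : d.items = M.map (fun k => (k, f k))) (kw : String) :
    (d.insert kw (f kw)).items = (PySem.Set.add M kw).map (fun k => (k, f k)) := by
  by_cases hm : kw ∈ M
  · rw [PySem.Dict.items_insert_of_contains d (f kw) (by rw [pv_contains_of_items d M f h]; simpa),
        pv_set_add_mem M kw hm, h, List.map_map]
    refine List.map_congr_left (fun k hk => ?_)
    simp only [Function.comp_apply]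
    by_cases he : k = kw
    · subst he; simp
    · simp [he]
  · rw [PySem.Dict.items_insert_of_not_contains d (f kw) (by rw [pv_contains_of_items d M f h]; simpa),
        pv_set_add_not_mem M kw hm, h, List.map_append]
    simp

-- A's outer fold builds exactly the pair list over the distinct found keywords
lemma pv_A_fold (s : String) (kws : List String) (l : List String) :
    ∀ (M : List String) (d : PySem.Dict String String),
    d.items = M.map (fun k => (k, pvValA s kws k)) →
    (l.foldl (find_related_text_step s kws) d).items
      = (PySem.Set.update M (l.filter (fun kw => decide (0 ≤ PySem.Str.find s kw)))).map
          (fun k => (k, pvValA s kws k)) := by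
  induction l with
  | nil => intro M d h; simpa [PySem.Set.update] using h
  | cons kw l ih =>
    intro M d h
    rw [List.foldl_cons]
    by_cases hf : PySem.Str.find s kw < 0
    · rw [List.filter_cons_of_neg (by simpa using (by omega : ¬ (0 ≤ PySem.Str.find s kw)))]
      rw [show find_related_text_step s kws d kw = d by
        simp only [find_related_text_step]; rw [if_pos hf]]
      exact ih M d h
    · rw [List.filter_cons_of_pos (by simpa using (by omega : 0 ≤ PySem.Str.find s kw)),
          PySem.Set.update_cons]
      have hstep : find_related_text_step s kws d kw = d.insert kw (pvValA s kws kw) := by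
        simp only [find_related_text_step, pvValA]; rw [if_neg hf]
      rw [hstep]
      exact ih (PySem.Set.add M kw) (d.insert kw (pvValA s kws kw))
        (pv_insert_items d M (pvValA s kws) h kw)

-- B's first pass builds exactly the (keyword, first index) list over the same keys
lemma pv_B_fold (s : String) (l : List String) :
    ∀ (M : List String) (d : PySem.Dict String Int),
    d.items = M.map (fun k => (k, PySem.Str.find s k)) →
    (l.foldl (fun first kw =>
        if first.contains kw then first
        else
          let i := PySem.Str.find s kw
          if i ≠ -1 then first.insert kw i else first) d).items
      = (PySem.Set.update M (l.filter (fun kw => decide (0 ≤ PySem.Str.find s kw)))).map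
          (fun k => (k, PySem.Str.find s k)) := by
  induction l with
  | nil => intro M d h; simpa [PySem.Set.update] using h
  | cons kw l ih =>
    intro M d h
    rw [List.foldl_cons]
    have hc := pv_contains_of_items d M _ h kw
    by_cases hm : kw ∈ M
    · rw [show (if d.contains kw then d
          else
            let i := PySem.Str.find s kw
            if i ≠ -1 then d.insert kw i else d) = d by
        rw [if_pos (by simp [hc, hm])]]
      by_cases hf : 0 ≤ PySem.Str.find s kw
      · rw [List.filter_cons_of_pos (by simpa using hf), PySem.Set.update_cons, pv_set_add_mem M kw hm]
        exact ih M d h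
      · rw [List.filter_cons_of_neg (by simpa using hf)]
        exact ih M d h
    · have hcf : d.contains kw = false := by simp [hc, hm]
      by_cases hf : 0 ≤ PySem.Str.find s kw
      · have hne : PySem.Str.find s kw ≠ -1 := by omega
        rw [show (if d.contains kw then d
            else
              let i := PySem.Str.find s kw
              if i ≠ -1 then d.insert kw i else d) = d.insert kw (PySem.Str.find s kw) by
          rw [if_neg (by simp [hcf])]
          show (if PySem.Str.find s kw ≠ -1 then d.insert kw (PySem.Str.find s kw) else d) = _
          rw [if_pos hne]]
        rw [List.filter_cons_of_pos (by simpa using hf), PySem.Set.update_cons]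
        exact ih (PySem.Set.add M kw) _ (pv_insert_items d M (fun k => PySem.Str.find s k) h kw)
      · have hne : PySem.Str.find s kw = -1 := by
          have := pv_neg_one_le_find s kw; omega
        rw [show (if d.contains kw then d
            else
              let i := PySem.Str.find s kw
              if i ≠ -1 then d.insert kw i else d) = d by
          rw [if_neg (by simp [hcf])]
          show (if PySem.Str.find s kw ≠ -1 then d.insert kw (PySem.Str.find s kw) else d) = _
          rw [if_neg (by omega)]]
        rw [List.filter_cons_of_neg (by simpa using hf)]
        exact ih M d h

-- invariant of A's inner scan: the fold result is the accumulator or a found index above idx,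
-- it never grows, and it is a lower bound of every candidate
lemma pv_next_inv (s kw : String) (idx : Int) (hidx : 0 ≤ idx) (l : List String) :
    ∀ (a : Int),
    (l.foldl (pvStep s kw idx) a = a ∨
      (∃ kw' ∈ l, kw' ≠ kw ∧ PySem.Str.find s kw' = l.foldl (pvStep s kw idx) a) ∧
        idx < l.foldl (pvStep s kw idx) a) ∧
    l.foldl (pvStep s kw idx) a ≤ a ∧
    (∀ kw' ∈ l, kw' ≠ kw → idx < PySem.Str.find s kw' →
      l.foldl (pvStep s kw idx) a ≤ PySem.Str.find s kw') := by
  induction l with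
  | nil => intro a; simp
  | cons kw0 l ih =>
    intro a
    simp only [List.foldl_cons]
    obtain ⟨ha1, ha2, ha3⟩ := ih (pvStep s kw idx a kw0)
    have hstep : pvStep s kw idx a kw0 = a ∨
        (kw0 ≠ kw ∧ PySem.Str.find s kw0 = pvStep s kw idx a kw0 ∧ idx < pvStep s kw idx a kw0) := by
      unfold pvStep
      split_ifs with hne hneg hb
      · left; rfl
      · right; exact ⟨hne, rfl, hb.1⟩
      · left; rfl
      · left; rfl
    have hstep_le : pvStep s kw idx a kw0 ≤ a := by
      unfold pvStep; split_ifs with hne hneg hb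
      · exact le_refl _
      · exact le_of_lt hb.2
      · exact le_refl _
      · exact le_refl _
    have hstep_min : kw0 ≠ kw → idx < PySem.Str.find s kw0 → pvStep s kw idx a kw0 ≤ PySem.Str.find s kw0 := by
      intro hne hlt
      unfold pvStep
      rw [if_pos hne]
      split_ifs with hneg hb
      · omega
      · exact le_refl _
      · omega
    refine ⟨?_, le_trans ha2 hstep_le, ?_⟩
    · rcases ha1 with h | ⟨⟨kw', hmem, hne, heq⟩, hlt⟩
      · rw [h]
        rcases hstep with h2 | ⟨hne, heq, hlt⟩
        · left; exact h2
        · right; exact ⟨⟨kw0, List.mem_cons_self, hne, heq⟩, hlt⟩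
      · right; exact ⟨⟨kw', List.mem_cons_of_mem _ hmem, hne, heq⟩, hlt⟩
    · intro kw' hmem hne hlt
      rcases List.mem_cons.mp hmem with h | h
      · subst h; exact le_trans ha2 (hstep_min hne hlt)
      · exact ha3 kw' h hne hlt

-- invariant of B's bisection loop
theorem pv_go_inv (xs : List Int) (x : Int) (hs : xs.Pairwise (fun a b => a ≤ b)) (lo hi : Nat)
    (h1 : lo ≤ hi) (h2 : hi ≤ xs.length)
    (h3 : ∀ i (h : i < xs.length), i < lo → xs[i] ≤ x)
    (h4 : ∀ i (h : i < xs.length), hi ≤ i → x < xs[i]) :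
    nextGreaterGo xs x lo hi ≤ xs.length ∧
    (∀ i (h : i < xs.length), i < nextGreaterGo xs x lo hi → xs[i] ≤ x) ∧
    (∀ i (h : i < xs.length), nextGreaterGo xs x lo hi ≤ i → x < xs[i]) := by
  rw [nextGreaterGo]
  have hmono : ∀ (i j : Nat) (hi' : i < xs.length) (hj' : j < xs.length), i ≤ j → xs[i] ≤ xs[j] := by
    intro i j hi' hj' hij
    rcases Nat.lt_or_eq_of_le hij with h | h
    · exact (List.pairwise_iff_getElem.mp hs) i j hi' hj' h
    · subst h; exact le_refl _
  by_cases h : lo < hi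
  · simp only [h, dif_pos]
    have hmid : (lo + hi) / 2 < xs.length := by omega
    have hgetD : xs.getD ((lo + hi) / 2) 0 = xs[(lo + hi) / 2] := List.getD_eq_getElem xs 0 hmid
    by_cases hle : xs.getD ((lo + hi) / 2) 0 ≤ x
    · simp only [hle, if_pos]
      exact pv_go_inv xs x hs ((lo + hi) / 2 + 1) hi (by omega) h2
        (fun i hi' hlt => le_trans (hmono i ((lo+hi)/2) hi' hmid (by omega)) (hgetD ▸ hle)) h4
    · simp only [hle, if_neg, not_false_iff]
      exact pv_go_inv xs x hs lo ((lo + hi) / 2) (by omega) (by omega) h3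
        (fun i hi' hge => lt_of_lt_of_le (lt_of_not_ge (hgetD ▸ hle)) (hmono ((lo+hi)/2) i hmid hi' hge))
  · simp only [h, dif_neg, not_false_iff]
    exact ⟨by omega, fun i hi' hlt => h3 i hi' (by omega), fun i hi' hge => h4 i hi' (by omega)⟩
termination_by hi - lo
decreasing_by all_goals omega

-- the two "text until the next keyword" computations agree on every found keyword
lemma pv_val_eq (s : String) (kws : List String) (kw : String)
    (hf : 0 ≤ PySem.Str.find s kw) :
    pvValA s kws kw =
      find_related_text_alt_val s
        (PySem.List.sorted (PySem.Set.ofList ((pvK s kws).map (fun k => PySem.Str.find s k))) (fun x => x))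
        (PySem.Str.len s) kw (PySem.Str.find s kw) := by
  set idx := PySem.Str.find s kw with hidx
  set n := PySem.Str.len s with hn
  set idxs := PySem.List.sorted (PySem.Set.ofList ((pvK s kws).map (fun k => PySem.Str.find s k))) (fun x => x) with hidxs
  have hsorted : idxs.Pairwise (fun a b => a < b) :=
    PySem.List.sorted_ofList_pairwise_lt ((pvK s kws).map (fun k => PySem.Str.find s k))
  have hle : idxs.Pairwise (fun a b => a ≤ b) := hsorted.imp le_of_lt
  have hmem : ∀ v : Int, v ∈ idxs ↔ ∃ kw' ∈ kws, 0 ≤ PySem.Str.find s kw' ∧ PySem.Str.find s kw' = v := by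
    intro v
    rw [hidxs, PySem.List.mem_sorted, PySem.Set.mem_ofList, List.mem_map]
    constructor
    · rintro ⟨k, hk, rfl⟩
      have := (PySem.Set.mem_ofList _ _).mp hk
      rw [List.mem_filter] at this
      exact ⟨k, this.1, by simpa using this.2, rfl⟩
    · rintro ⟨kw', hmem', hpos', rfl⟩
      exact ⟨kw', (PySem.Set.mem_ofList _ _).mpr (List.mem_filter.mpr ⟨hmem', by simpa using hpos'⟩), rfl⟩
  have hbound : ∀ v ∈ idxs, v ≤ n := by
    intro v hv
    obtain ⟨kw', _, _, rfl⟩ := (hmem v).mp hv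
    exact pv_find_le_len s kw'
  obtain ⟨hj1, hj2, hj3⟩ := pv_go_inv idxs idx hle 0 idxs.length (by omega) (le_refl _)
    (fun i hi hlt => by omega) (fun i hi hge => by omega)
  set j := nextGreaterGo idxs idx 0 idxs.length with hj
  set nxt : Int := if j < idxs.length then idxs.getD j 0 else n with hnxt
  obtain ⟨ha1, ha2, ha3⟩ := pv_next_inv s kw idx hf kws n
  rw [pvValA, find_related_text_alt_val]
  have hkey : find_related_text_next s kws kw idx = nxt := by
    rw [pv_next_eq]
    set r := kws.foldl (pvStep s kw idx) n with hr
    have h_r_le : r ≤ nxt := by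
      by_cases hjlen : j < idxs.length
      · have hget : idxs.getD j 0 = idxs[j] := List.getD_eq_getElem idxs 0 hjlen
        have hvmem : idxs[j] ∈ idxs := List.getElem_mem hjlen
        obtain ⟨kw', hmem', hpos', heq'⟩ := (hmem idxs[j]).mp hvmem
        have hlt : idx < idxs[j] := hj3 j hjlen (le_refl _)
        have hne : kw' ≠ kw := by
          intro h; rw [h] at heq'; rw [← hidx] at heq'; omega
        have := ha3 kw' hmem' hne (by omega)
        rw [hnxt, if_pos hjlen, hget, ← heq']
        exact this
      · rw [hnxt, if_neg hjlen]; exact ha2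
    have h_nxt_le : nxt ≤ r := by
      rcases ha1 with hra | ⟨⟨kw', hmem', hne', heq'⟩, hlt⟩
      · rw [hra]
        by_cases hjlen : j < idxs.length
        · rw [hnxt, if_pos hjlen, List.getD_eq_getElem idxs 0 hjlen]
          exact hbound _ (List.getElem_mem hjlen)
        · rw [hnxt, if_neg hjlen]
      · have hrin : r ∈ idxs := (hmem r).mpr ⟨kw', hmem', by omega, heq'⟩
        obtain ⟨i, hi, hieq⟩ := List.getElem_of_mem hrin
        have hnotlt : ¬ i < j := by
          intro hij
          have := hj2 i hi hij
          rw [hieq] at this; omega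
        have hji : j ≤ i := by omega
        have hjlen : j < idxs.length := by omega
        rw [hnxt, if_pos hjlen, List.getD_eq_getElem idxs 0 hjlen, ← hieq]
        rcases Nat.lt_or_eq_of_le hji with h | h
        · exact le_of_lt ((List.pairwise_iff_getElem.mp hsorted) j i hjlen hi h)
        · subst h; exact le_refl _
    omega
  rw [hkey]

lemma pv_first_items (s : String) (kws : List String) :
    (find_related_text_alt_first s kws).items = (pvK s kws).map (fun k => (k, PySem.Str.find s k)) := by
  rw [find_related_text_alt_first, pv_B_fold s kws [] PySem.Dict.empty (by simp [PySem.Dict.empty]),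
      PySem.Set.update_nil_left]
  rfl

lemma pv_A_eq (s : String) (kws : List String) :
    find_related_text s kws = (pvK s kws).map (fun k => (k, pvValA s kws k)) := by
  rw [find_related_text, pv_A_fold s kws kws [] PySem.Dict.empty (by simp [PySem.Dict.empty]),
      PySem.Set.update_nil_left]
  rfl

lemma pv_B_eq (s : String) (kws : List String) :
    find_related_text_alt s kws = (pvK s kws).map (fun k =>
      (k, find_related_text_alt_val s
            (PySem.List.sorted (PySem.Set.ofList ((pvK s kws).map (fun k => PySem.Str.find s k))) (fun x => x))
            (PySem.Str.len s) k (PySem.Str.find s k))) := by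
  simp only [find_related_text_alt]
  have hvals : (find_related_text_alt_first s kws).values = (pvK s kws).map (fun k => PySem.Str.find s k) := by
    simp only [PySem.Dict.values, pv_first_items, List.map_map]
    rfl
  rw [hvals, pv_first_items]
  rw [PySem.Dict.items_foldl_insert_fresh ((pvK s kws).map (fun k => (k, PySem.Str.find s k)))
    (fun p => p.1)
    (fun p => find_related_text_alt_val s
        (PySem.List.sorted (PySem.Set.ofList ((pvK s kws).map (fun k => PySem.Str.find s k))) (fun x => x))
        (PySem.Str.len s) p.1 p.2)
    PySem.Dict.empty
    (fun a _ => by simp [PySem.Dict.contains, PySem.Dict.empty])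
    (by
      rw [List.map_map]
      have hnd : (pvK s kws).Nodup := by
        unfold pvK; exact PySem.Set.nodup_ofList _
      have hid : List.map ((fun (p : String × Int) => p.1) ∘ fun k => (k, PySem.Str.find s k)) (pvK s kws)
          = pvK s kws := by
        rw [show ((fun (p : String × Int) => p.1) ∘ fun k => (k, PySem.Str.find s k)) = fun (k : String) => k from rfl]
        exact List.map_id' _
      rw [hid]; exact hnd)]
  simp [PySem.Dict.empty, List.map_map, Function.comp]

-- ===== VERDICT (by name: the statement is the Claim_ definition above) =====
theorem find_related_text_spec : Claim_equal_find_related_text := by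
  intro s kws _
  show find_related_text s kws = find_related_text_alt s kws
  rw [pv_A_eq, pv_B_eq]
  refine List.map_congr_left (fun k hk => ?_)
  have hmem : k ∈ kws.filter (fun kw => decide (0 ≤ PySem.Str.find s kw)) :=
    (PySem.Set.mem_ofList _ _).mp hk
  rw [List.mem_filter] at hmem
  exact congrArg (Prod.mk k) (pv_val_eq s kws k (by simpa using hmem.2))
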